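-- pv_equiv track=rewrite | github.com/Brasme/batteries_4_of_8 | sequences.py | generate_partition_based_sequences
-- ===== SOURCE A (Python) =====
-- import itertools
--
-- def generate_partition_based_sequences(n=8):
--     """Generate sequences by partitioning indices and creating covering pairs.
--
--     Yields different sequences based on various partition strategies.
--     Each sequence always starts with (0, 1).
--     """
--     indices = list(range(n))
--
--     # Define partition schemes: tuples of group sizes that sum to 8
--     partitions = [
--         (3, 3, 2),
--         (2, 3, 3),
--         (1, 2, 3, 2),
--         (2, 3, 1, 2),
--         (2, 1, 1, 2, 2),
--         (2, 3, 1, 2),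
--         (2, 2, 4),
--         (4, 2, 2),
--         (2, 4, 2),
--         (3, 2, 3),
--         (4, 4)
--     ]
--
--     for partition in partitions:
--         # Generate all ways to partition 8 indices into groups of sizes partition
--         for groups in generate_partitions(indices, partition):
--             # Generate a sequence that covers these groups
--             sequence = generate_covering_sequence(groups)
--             if sequence and sequence[0] == (0, 1):
--                 yield sequence
--
-- def generate_partitions(indices, sizes):
--     """Generate all ways to partition indices into groups of given sizes.
--
--     Args:
--         indices: list of indices to partition
--         sizes: tuple of group sizes (must sum to len(indices))
--
--     Yields:
--         Lists of groups, each group is a list of indices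
--     """
--     if not sizes:
--         yield []
--         return
--
--     size = sizes[0]
--     remaining_sizes = sizes[1:]
--
--     for group in itertools.combinations(indices, size):
--         remaining_indices = [i for i in indices if i not in group]
--         for rest in generate_partitions(remaining_indices, remaining_sizes):
--             yield [list(group)] + rest
--
-- def generate_covering_sequence(groups):
--     """Generate a pair sequence that covers the given groups.
--
--     Strategy: Create pairs that span/connect groups sensibly.
--     Try to pair indices across groups to maximize coverage.
--     Always start with (0, 1) if 0 and 1 are in different groups.
--     """
--     all_indices = [idx for group in groups for idx in group]
--     all_pairs = list(itertools.combinations(all_indices, 2))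
--
--     # Ensure (0, 1) is first if it exists
--     sequence = []
--     if (0, 1) in all_pairs:
--         sequence = [(0, 1)]
--         remaining_pairs = [p for p in all_pairs if p != (0, 1)]
--     else:
--         remaining_pairs = all_pairs
--
--     # Sort remaining pairs: prioritize those crossing groups
--     def crossing_count(pair):
--         a, b = pair
--         group_a = next((i for i, g in enumerate(groups) if a in g), -1)
--         group_b = next((i for i, g in enumerate(groups) if b in g), -1)
--         return 0 if group_a == group_b else 1  # Crossing pairs first
--
--     remaining_pairs.sort(key=crossing_count, reverse=True)
--     sequence.extend(remaining_pairs)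
--
--     return sequence
-- ===== SOURCE B (Python) =====
-- import itertools
--
-- def generate_partition_based_sequences(n=8):
--     """Same generator; partitions expanded iteratively, covering sequence built by a
--     single suffix-consuming pass into three buckets (head / crossing / same-group)."""
--     indices = list(range(n))
--     partitions = [
--         (3, 3, 2),
--         (2, 3, 3),
--         (1, 2, 3, 2),
--         (2, 3, 1, 2),
--         (2, 1, 1, 2, 2),
--         (2, 3, 1, 2),
--         (2, 2, 4),
--         (4, 2, 2),
--         (2, 4, 2),
--         (3, 2, 3),
--         (4, 4)
--     ]
--     for partition in partitions:
--         for groups in generate_partitions(indices, partition):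
--             sequence = generate_covering_sequence(groups)
--             if sequence and sequence[0] == (0, 1):
--                 yield sequence
--
-- def generate_partitions(indices, sizes):
--     """Iterative level-by-level expansion (same order as the recursive formulation)."""
--     states = [([], indices)]
--     for size in sizes:
--         states = [(done + [list(c)], [i for i in rem if i not in c])
--                   for done, rem in states
--                   for c in itertools.combinations(rem, size)]
--     for done, _rem in states:
--         yield done
--
-- def generate_covering_sequence(groups):
--     """Tag each index with its group position, then one suffix-consuming pass that
--     classifies every pair into head/crossing/same buckets (stable, no sort, no lookups)."""
--     tagged = [(idx, g) for g, group in enumerate(groups) for idx in group]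
--     head, crossing, same = [], [], []
--     while tagged:
--         (a, la), tagged = tagged[0], tagged[1:]
--         for b, lb in tagged:
--             if (a, b) == (0, 1):
--                 head.append((a, b))
--             elif la != lb:
--                 crossing.append((a, b))
--             else:
--                 same.append((a, b))
--     return head + crossing + same
-- ===== Notes on version B (the rewrite author's own statement) =====
-- stated objective: alternative
-- what changed: generate_partitions becomes an iterative level-by-level expansion instead of recursion, and generate_covering_sequence tags each index with its group position once and then makes one suffix-consuming pass over the tagged list, classifying every pair directly into head/crossing/same buckets, replacing itertools.combinations plus the reverse-sorted keyed sort whose key rescans all groups per pair.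
import Mathlib
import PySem

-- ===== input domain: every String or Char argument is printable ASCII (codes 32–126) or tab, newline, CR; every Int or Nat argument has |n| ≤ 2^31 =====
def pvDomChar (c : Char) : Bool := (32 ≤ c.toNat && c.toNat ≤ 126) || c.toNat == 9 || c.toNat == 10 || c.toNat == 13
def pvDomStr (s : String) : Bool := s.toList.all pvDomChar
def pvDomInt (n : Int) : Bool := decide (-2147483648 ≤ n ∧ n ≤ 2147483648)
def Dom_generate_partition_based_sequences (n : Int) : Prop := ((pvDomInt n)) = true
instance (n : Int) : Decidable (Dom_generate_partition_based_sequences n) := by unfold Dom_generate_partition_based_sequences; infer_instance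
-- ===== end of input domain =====

-- B replaces A's recursive partition generator by an iterative level-by-level expansion and A's
-- combinations+stable-keyed-reverse-sort covering builder by one suffix-consuming pass over a
-- group-tagged index list that classifies each pair into head/crossing/same buckets (objective:
-- alternative). Under the declared return type List (Int × Int), the Python generator's yielded
-- pair-sequences are concatenated, in yield order, into one list.


-- the literal `partitions` scheme list both sources contain
def pvPartitionSchemes : List (List Nat) :=
  [[3, 3, 2], [2, 3, 3], [1, 2, 3, 2], [2, 3, 1, 2], [2, 1, 1, 2, 2], [2, 3, 1, 2],
   [2, 2, 4], [4, 2, 2], [2, 4, 2], [3, 2, 3], [4, 4]]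

-- ===== PORT A =====
-- itertools.combinations(l, 2) as pairs, in CPython's index-lexicographic order (exact)
def pvPairs (l : List Int) : List (Int × Int) :=
  match l with
  | [] => []
  | x :: xs => xs.map (fun y => (x, y)) ++ pvPairs xs

-- A's recursive generate_partitions (itertools.combinations = PySem.List.combinations)
def pvGenPartsA (indices : List Int) (sizes : List Nat) : List (List (List Int)) :=
  match sizes with
  | [] => [[]]
  | size :: remaining_sizes =>
    (PySem.List.combinations indices size).flatMap (fun group =>
      (pvGenPartsA (indices.filter (fun i => !group.contains i)) remaining_sizes).map
        (fun rest => group :: rest))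

-- next((i for i, g in enumerate(groups) if x in g), -1)
def pvGroupIdx (groups : List (List Int)) (x : Int) : Int :=
  ((((PySem.List.enumerate groups 0).find? (fun ig => ig.2.contains x)).map (·.1))).getD (-1)

-- A's crossing_count
def pvCrossingCount (groups : List (List Int)) (pair : Int × Int) : Int :=
  if pvGroupIdx groups pair.1 == pvGroupIdx groups pair.2 then 0 else 1

-- A's generate_covering_sequence: strip a leading (0,1), stable reverse sort by crossing_count
def pvGenCovA (groups : List (List Int)) : List (Int × Int) :=
  let all_pairs := pvPairs groups.flatten
  let sr : List (Int × Int) × List (Int × Int) :=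
    if ((0 : Int), (1 : Int)) ∈ all_pairs then
      ([((0 : Int), (1 : Int))], all_pairs.filter (fun p => p ≠ ((0 : Int), (1 : Int))))
    else ([], all_pairs)
  sr.1 ++ PySem.List.sorted sr.2 (pvCrossingCount groups) true

-- the generator: yielded sequences in yield order
def pvGenA (indices : List Int) : List (List (Int × Int)) :=
  pvPartitionSchemes.flatMap (fun partition =>
    (pvGenPartsA indices partition).filterMap (fun groups =>
      let sequence := pvGenCovA groups
      -- `if sequence and sequence[0] == (0, 1): yield sequence`
      if sequence.head? = some ((0 : Int), (1 : Int)) then some sequence else none))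

def generate_partition_based_sequences (n : Int) : List (Int × Int) :=
  (pvGenA (PySem.List.pyRange 0 n 1)).flatten

-- ===== PORT B =====
-- B's iterative generate_partitions: fold over sizes, expanding (done, remaining) states
def pvGenPartsB (indices : List Int) (sizes : List Nat) : List (List (List Int)) :=
  (sizes.foldl (fun states size =>
      states.flatMap (fun dr =>
        (PySem.List.combinations dr.2 size).map (fun c =>
          (dr.1 ++ [c], dr.2.filter (fun i => !c.contains i)))))
    [(([] : List (List Int)), indices)]).map (·.1)

-- `tagged = [(idx, g) for g, group in enumerate(groups) for idx in group]`
def pvTagged (groups : List (List Int)) : List (Int × Int) :=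
  (PySem.List.enumerate groups 0).flatMap (fun gp => gp.2.map (fun idx => (idx, gp.1)))

-- the inner `for b, lb in tagged:` body: classify one pair into one of the three buckets
def pvCovStep (a la : Int) (st : List (Int × Int) × List (Int × Int) × List (Int × Int))
    (q : Int × Int) : List (Int × Int) × List (Int × Int) × List (Int × Int) :=
  if (a, q.1) = ((0 : Int), (1 : Int)) then (st.1 ++ [(a, q.1)], st.2.1, st.2.2)
  else if la ≠ q.2 then (st.1, st.2.1 ++ [(a, q.1)], st.2.2)
  else (st.1, st.2.1, st.2.2 ++ [(a, q.1)])

-- the `while tagged:` loop consuming the tagged list suffix by suffix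
def pvCovLoop (tagged : List (Int × Int))
    (st : List (Int × Int) × List (Int × Int) × List (Int × Int)) :
    List (Int × Int) × List (Int × Int) × List (Int × Int) :=
  match tagged with
  | [] => st
  | al :: rest => pvCovLoop rest (rest.foldl (pvCovStep al.1 al.2) st)

-- B's generate_covering_sequence
def pvGenCovB (groups : List (List Int)) : List (Int × Int) :=
  let st := pvCovLoop (pvTagged groups) ([], [], [])
  st.1 ++ st.2.1 ++ st.2.2

def pvGenB (indices : List Int) : List (List (Int × Int)) :=
  pvPartitionSchemes.flatMap (fun partition =>
    (pvGenPartsB indices partition).filterMap (fun groups =>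
      let sequence := pvGenCovB groups
      if sequence.head? = some ((0 : Int), (1 : Int)) then some sequence else none))

def generate_partition_based_sequences_alt (n : Int) : List (Int × Int) :=
  (pvGenB (PySem.List.pyRange 0 n 1)).flatten

-- ===== PRECONDITION & SPEC =====
def Spec_generate_partition_based_sequences (n : Int) (out : List (Int × Int)) : Prop := out = generate_partition_based_sequences_alt n
instance (n : Int) (out : List (Int × Int)) : Decidable (Spec_generate_partition_based_sequences n out) := by unfold Spec_generate_partition_based_sequences; infer_instance

-- ===== CLAIM (what is proved, stated in full; the proofs are below) =====
def Claim_equal_generate_partition_based_sequences : Prop := ∀ (n : Int), Dom_generate_partition_based_sequences n → Spec_generate_partition_based_sequences n (generate_partition_based_sequences n)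

-- ===== LEMMAS AND PROOFS =====

-- generic index-lexicographic pairs (proof-side; pvPairs is its Int instance)
def pvC2 {α : Type} (l : List α) : List (α × α) :=
  match l with
  | [] => []
  | x :: xs => xs.map (fun y => (x, y)) ++ pvC2 xs

theorem pvPairs_eq_pvC2 (l : List Int) : pvPairs l = pvC2 l := by
  induction l with
  | nil => rfl
  | cons x xs ih => simp [pvPairs, pvC2, ih]

theorem pvC2_map {α β : Type} (f : α → β) (l : List α) :
    pvC2 (l.map f) = (pvC2 l).map (fun q => (f q.1, f q.2)) := by
  induction l with
  | nil => rfl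
  | cons x xs ih => simp [pvC2, ih, List.map_map, Function.comp_def]

theorem mem_pvC2 {α : Type} (l : List α) (q : α × α) (hq : q ∈ pvC2 l) :
    q.1 ∈ l ∧ q.2 ∈ l := by
  induction l with
  | nil => simp [pvC2] at hq
  | cons x xs ih =>
    simp only [pvC2, List.mem_append, List.mem_map] at hq
    rcases hq with ⟨y, hy, hxy⟩ | hq
    · subst hxy; exact ⟨by simp, by simp [hy]⟩
    · rcases ih hq with ⟨h1, h2⟩; exact ⟨by simp [h1], by simp [h2]⟩

theorem pvC2_nodup {α : Type} [DecidableEq α] (l : List α) (hl : l.Nodup) :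
    (pvC2 l).Nodup := by
  induction l with
  | nil => simp [pvC2]
  | cons x xs ih =>
    rcases List.nodup_cons.mp hl with ⟨hx, hxs⟩
    simp only [pvC2]
    refine List.Nodup.append ?_ (ih hxs) ?_
    · exact List.Nodup.map (fun a b h => congrArg Prod.snd h) hxs
    · intro q hq1 hq2
      rcases List.mem_map.mp hq1 with ⟨y, _, rfl⟩
      exact hx ((mem_pvC2 xs _ hq2).1)

-- on a nodup list, filtering for one literal value keeps exactly its (single) occurrence
theorem pv_filter_single {α : Type} [DecidableEq α] (l : List α) (a : α) (hl : l.Nodup) :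
    l.filter (fun p => p = a) = if a ∈ l then [a] else [] := by
  induction l with
  | nil => simp
  | cons x xs ih =>
    rcases List.nodup_cons.mp hl with ⟨hx, hxs⟩
    by_cases hxa : x = a
    · subst hxa
      simp [ih hxs, hx]
    · simp [hxa, ih hxs, Ne.symm hxa]

-- insertBy walks past a whole prefix it is not 'before'
theorem pv_insertBy_append {α : Type} (before : α → α → Bool) (x : α) (l1 l2 : List α)
    (h : ∀ y ∈ l1, before x y = false) :
    PySem.List.insertBy before x (l1 ++ l2) = l1 ++ PySem.List.insertBy before x l2 := by
  induction l1 with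
  | nil => simp
  | cons y t ih =>
    have hy : before x y = false := h y (by simp)
    simp [PySem.List.insertBy, hy]
    exact ih (fun z hz => h z (by simp [hz]))

-- the stable reverse insertion sort of a 0/1-keyed list is the two-bucket split
theorem pv_foldl_insertBy_split {α : Type} (key : α → Int) (xs : List α) :
    ∀ (ones zeros : List α), (∀ x ∈ xs, key x = 0 ∨ key x = 1) →
    (∀ y ∈ ones, key y = 1) → (∀ y ∈ zeros, key y = 0) →
    xs.foldl (fun acc x => PySem.List.insertBy (fun a b => decide (key b < key a)) x acc)
      (ones ++ zeros)
    = (ones ++ xs.filter (fun x => key x == 1)) ++ (zeros ++ xs.filter (fun x => key x == 0)) := by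
  induction xs with
  | nil => intro ones zeros _ _ _; simp
  | cons x t ih =>
    intro ones zeros hxs h1 h0
    have hx := hxs x (by simp)
    rcases hx with hx | hx
    · have hall : ∀ y ∈ ones ++ zeros, (decide (key y < key x)) = false := by
        intro y hy
        rcases List.mem_append.mp hy with hy | hy
        · simp [h1 y hy, hx]
        · simp [h0 y hy, hx]
      have hins : PySem.List.insertBy (fun a b => decide (key b < key a)) x (ones ++ zeros)
          = ones ++ (zeros ++ [x]) := by
        rw [PySem.List.insertBy_of_forall_not_before _ _ _ hall, List.append_assoc]
      have := ih ones (zeros ++ [x]) (fun z hz => hxs z (by simp [hz])) h1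
        (by intro y hy; rcases List.mem_append.mp hy with hy | hy
            · exact h0 y hy
            · simp at hy; simp [hy, hx])
      simp only [List.foldl_cons, hins, this]
      simp [hx, List.append_assoc]
    · have hpre : ∀ y ∈ ones, (decide (key y < key x)) = false := by
        intro y hy; simp [h1 y hy, hx]
      have hins : PySem.List.insertBy (fun a b => decide (key b < key a)) x (ones ++ zeros)
          = (ones ++ [x]) ++ zeros := by
        rw [pv_insertBy_append _ _ _ _ hpre]
        cases zeros with
        | nil => simp [PySem.List.insertBy]
        | cons z zs =>
          have hz : key z = 0 := h0 z (by simp)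
          have : (decide (key z < key x)) = true := by simp [hz, hx]
          simp [PySem.List.insertBy, this]
      have := ih (ones ++ [x]) zeros (fun z hz => hxs z (by simp [hz]))
        (by intro y hy; rcases List.mem_append.mp hy with hy | hy
            · exact h1 y hy
            · simp at hy; simp [hy, hx]) h0
      simp only [List.foldl_cons, hins, this]
      simp [hx, List.append_assoc]

theorem pv_sorted_split {α : Type} (key : α → Int) (xs : List α)
    (hxs : ∀ x ∈ xs, key x = 0 ∨ key x = 1) :
    PySem.List.sorted xs key true
    = xs.filter (fun x => key x == 1) ++ xs.filter (fun x => key x == 0) := by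
  rw [PySem.List.sorted_rev_eq_foldl_insertBy]
  have := pv_foldl_insertBy_split key xs [] [] hxs (by simp) (by simp)
  simpa using this

-- B's level-by-level fold computes A's recursion, each state's done-prefix distributed out
theorem pv_parts_foldl (sizes : List Nat) :
    ∀ (states : List (List (List Int) × List Int)),
    (sizes.foldl (fun states size =>
        states.flatMap (fun dr =>
          (PySem.List.combinations dr.2 size).map (fun c =>
            (dr.1 ++ [c], dr.2.filter (fun i => !c.contains i)))))
      states).map (·.1)
    = states.flatMap (fun dr => (pvGenPartsA dr.2 sizes).map (fun gs => dr.1 ++ gs)) := by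
  induction sizes with
  | nil =>
    intro states
    induction states with
    | nil => simp
    | cons a t iht => simp_all [pvGenPartsA]
  | cons s rest ih =>
    intro states
    simp only [List.foldl_cons, ih, pvGenPartsA]
    simp only [List.flatMap_assoc, List.flatMap_map, List.map_flatMap, List.map_map]
    simp [Function.comp_def, List.append_assoc]

theorem pv_partsB_eq (indices : List Int) (sizes : List Nat) :
    pvGenPartsB indices sizes = pvGenPartsA indices sizes := by
  unfold pvGenPartsB
  rw [pv_parts_foldl]
  simp

-- every index of every group of a generated partition comes from `indices`
theorem pv_parts_sub (sizes : List Nat) :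
    ∀ (indices : List Int) (gs : List (List Int)), gs ∈ pvGenPartsA indices sizes →
    ∀ g ∈ gs, ∀ x ∈ g, x ∈ indices := by
  induction sizes with
  | nil => intro indices gs hgs; simp [pvGenPartsA] at hgs; subst hgs; simp
  | cons s rest ih =>
    intro indices gs hgs
    simp only [pvGenPartsA, List.mem_flatMap, List.mem_map] at hgs
    rcases hgs with ⟨group, hgroup, r, hr, hgs⟩
    subst hgs
    intro g hg x hx
    rcases List.mem_cons.mp hg with hg | hg
    · subst hg
      exact (PySem.List.sublist_of_mem_combinations hgroup).subset hx
    · have := ih _ r hr g hg x hx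
      exact List.mem_of_mem_filter this

-- the groups of a generated partition are pairwise disjoint
theorem pv_parts_disj (sizes : List Nat) :
    ∀ (indices : List Int) (gs : List (List Int)), gs ∈ pvGenPartsA indices sizes →
    gs.Pairwise (fun g h => ∀ x ∈ g, x ∉ h) := by
  induction sizes with
  | nil => intro indices gs hgs; simp [pvGenPartsA] at hgs; subst hgs; simp
  | cons s rest ih =>
    intro indices gs hgs
    simp only [pvGenPartsA, List.mem_flatMap, List.mem_map] at hgs
    rcases hgs with ⟨group, hgroup, r, hr, hgs⟩
    subst hgs
    refine List.Pairwise.cons ?_ (ih _ r hr)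
    intro h hh x hxg hxh
    have hxrem := pv_parts_sub rest _ r hr h hh x hxh
    have := List.of_mem_filter hxrem
    simp [hxg] at this

-- the flattened groups of a generated partition are nodup (indices nodup)
theorem pv_parts_nodup (sizes : List Nat) :
    ∀ (indices : List Int), indices.Nodup →
    ∀ gs ∈ pvGenPartsA indices sizes, gs.flatten.Nodup := by
  induction sizes with
  | nil => intro indices _ gs hgs; simp [pvGenPartsA] at hgs; subst hgs; simp
  | cons s rest ih =>
    intro indices hind gs hgs
    simp only [pvGenPartsA, List.mem_flatMap, List.mem_map] at hgs
    rcases hgs with ⟨group, hgroup, r, hr, hgs⟩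
    subst hgs
    have hgn : group.Nodup :=
      (PySem.List.sublist_of_mem_combinations hgroup).nodup hind
    have hrem : (indices.filter (fun i => !group.contains i)).Nodup := hind.filter _
    have hrn : r.flatten.Nodup := ih _ hrem r hr
    rw [List.flatten_cons, List.nodup_append]
    refine ⟨hgn, hrn, ?_⟩
    intro x hxg y hyr
    rcases List.mem_flatten.mp hyr with ⟨g, hg, hyg⟩
    have := List.of_mem_filter (pv_parts_sub rest _ r hr g hg y hyg)
    intro hxy
    subst hxy
    simp [hxg] at this

-- proof-side: the index of the (unique) group containing x
def pvIdx (gs : List (List Int)) (x : Int) : Int :=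
  match gs with
  | [] => 0
  | g :: t => if x ∈ g then 0 else 1 + pvIdx t x

-- A's first-match scan yields pvIdx
theorem pv_find_idx (gs : List (List Int)) (x : Int) :
    ∀ s : Int, x ∈ gs.flatten →
    ((((PySem.List.enumerate gs s).find? (fun ig => ig.2.contains x)).map (·.1))).getD (-1)
    = s + pvIdx gs x := by
  induction gs with
  | nil => intro s hx; simp at hx
  | cons g t ih =>
    intro s hx
    by_cases hg : x ∈ g
    · simp [PySem.List.enumerate, hg, pvIdx]
    · have hxt : x ∈ t.flatten := by
        rw [List.flatten_cons] at hx
        rcases List.mem_append.mp hx with h | h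
        · exact absurd h hg
        · exact h
      have hgc : g.contains x = false := by simp [hg]
      simp only [PySem.List.enumerate, List.find?, hgc]
      rw [ih (s + 1) hxt]
      simp [pvIdx, hg]; ring

-- every tagged entry carries its element's first-match group index (disjoint groups)
theorem pv_tag_idx (gs : List (List Int)) :
    ∀ s : Int, gs.Pairwise (fun g h => ∀ x ∈ g, x ∉ h) →
    ∀ p ∈ (PySem.List.enumerate gs s).flatMap (fun gp => gp.2.map (fun idx => (idx, gp.1))),
    p.1 ∈ gs.flatten ∧ p.2 = s + pvIdx gs p.1 := by
  induction gs with
  | nil => intro s _ p hp; simp [PySem.List.enumerate] at hp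
  | cons g t ih =>
    intro s hp p hmem
    rcases List.pairwise_cons.mp hp with ⟨hhead, htail⟩
    simp only [PySem.List.enumerate_cons, List.flatMap_cons, List.mem_append, List.mem_map] at hmem
    rcases hmem with ⟨x, hx, rfl⟩ | hmem
    · refine ⟨by rw [List.flatten_cons]; exact List.mem_append.mpr (Or.inl hx), ?_⟩
      simp [pvIdx, hx]
    · rcases ih (s + 1) htail p hmem with ⟨h1, h2⟩
      have hxg : p.1 ∉ g := by
        intro hxg
        rcases List.mem_flatten.mp h1 with ⟨h, hh, hxh⟩
        exact hhead h hh p.1 hxg hxh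
      refine ⟨by simp [List.flatten_cons, h1], ?_⟩
      rw [h2]
      simp [pvIdx, hxg]; ring

-- the tagged list projects onto the flattened groups
theorem pv_tag_fst (gs : List (List Int)) :
    ∀ s : Int,
    ((PySem.List.enumerate gs s).flatMap (fun gp => gp.2.map (fun idx => (idx, gp.1)))).map
      Prod.fst = gs.flatten := by
  induction gs with
  | nil => intro s; simp [PySem.List.enumerate]
  | cons g t ih =>
    intro s
    simp [PySem.List.enumerate_cons, List.flatMap_cons, List.map_append, List.map_map,
      Function.comp_def, ih (s + 1)]

-- the inner classification loop: three buckets as filters of the suffix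
theorem pv_cov_fold (a la : Int) (xs : List (Int × Int)) :
    ∀ (h c s : List (Int × Int)),
    xs.foldl (pvCovStep a la) (h, c, s)
    = (h ++ (xs.filter (fun q => (a, q.1) = ((0 : Int), (1 : Int)))).map (fun q => (a, q.1)),
       c ++ (xs.filter (fun q => !decide ((a, q.1) = ((0 : Int), (1 : Int))) && decide (la ≠ q.2))).map (fun q => (a, q.1)),
       s ++ (xs.filter (fun q => !decide ((a, q.1) = ((0 : Int), (1 : Int))) && !decide (la ≠ q.2))).map (fun q => (a, q.1))) := by
  induction xs with
  | nil => intro h c s; simp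
  | cons x t ih =>
    intro h c s
    by_cases h1 : (a, x.1) = ((0 : Int), (1 : Int))
    · rw [Prod.mk.injEq] at h1
      obtain ⟨ha, hb⟩ := h1
      subst ha
      simp [List.foldl_cons, pvCovStep, hb, ih, List.append_assoc]
    · have hif : ¬(a = 0 ∧ x.1 = 1) := by rw [Prod.mk.injEq] at h1; exact h1
      have hpos : ¬a = 0 ∨ ¬x.1 = 1 := not_and_or.mp hif
      by_cases h2 : la ≠ x.2
      · simp [List.foldl_cons, pvCovStep, h1, hif, hpos, h2, ih, List.append_assoc]
      · have h2' : la = x.2 := not_not.mp h2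
        subst h2'
        simp [List.foldl_cons, pvCovStep, h1, hif, hpos, ih]

-- the whole while-loop: three buckets as filters of the pair list of the tagged list
theorem pv_cov_loop (tagged : List (Int × Int)) :
    ∀ (h c s : List (Int × Int)),
    pvCovLoop tagged (h, c, s)
    = (h ++ ((pvC2 tagged).filter (fun q => (q.1.1, q.2.1) = ((0 : Int), (1 : Int)))).map
            (fun q => (q.1.1, q.2.1)),
       c ++ ((pvC2 tagged).filter (fun q => !decide ((q.1.1, q.2.1) = ((0 : Int), (1 : Int))) && decide (q.1.2 ≠ q.2.2))).map
            (fun q => (q.1.1, q.2.1)),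
       s ++ ((pvC2 tagged).filter (fun q => !decide ((q.1.1, q.2.1) = ((0 : Int), (1 : Int))) && !decide (q.1.2 ≠ q.2.2))).map
            (fun q => (q.1.1, q.2.1))) := by
  induction tagged with
  | nil => intro h c s; simp [pvCovLoop, pvC2]
  | cons al rest ih =>
    intro h c s
    simp only [pvCovLoop, pv_cov_fold, ih, pvC2]
    simp [List.filter_append, List.map_append, List.filter_map, List.map_map,
      Function.comp_def, List.append_assoc]

-- crossing_count only takes the values 0 and 1
theorem pv_key_vals (groups : List (List Int)) (p : Int × Int) :
    pvCrossingCount groups p = 0 ∨ pvCrossingCount groups p = 1 := by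
  unfold pvCrossingCount; split <;> simp

-- the two covering-sequence builders agree on disjoint groups with nodup flatten
theorem pv_cov_eq (groups : List (List Int))
    (hdisj : groups.Pairwise (fun g h => ∀ x ∈ g, x ∉ h))
    (hnd : groups.flatten.Nodup) :
    pvGenCovA groups = pvGenCovB groups := by
  have hfst : (pvTagged groups).map Prod.fst = groups.flatten := pv_tag_fst groups 0
  have hC2 : pvC2 groups.flatten
      = (pvC2 (pvTagged groups)).map (fun q => (q.1.1, q.2.1)) := by
    rw [← hfst, pvC2_map]
  have hgidx : ∀ p ∈ pvTagged groups, pvGroupIdx groups p.1 = p.2 := by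
    intro p hp
    have htag := pv_tag_idx groups 0 hdisj p hp
    rcases htag with ⟨h1, h2⟩
    unfold pvGroupIdx
    rw [pv_find_idx groups p.1 0 h1, h2]
  -- B's three buckets, as filters of the plain pair list
  have hH : ((pvC2 (pvTagged groups)).filter
        (fun q => (q.1.1, q.2.1) = ((0 : Int), (1 : Int)))).map (fun q => (q.1.1, q.2.1))
      = (pvC2 groups.flatten).filter (fun p => p = ((0 : Int), (1 : Int))) := by
    rw [hC2, List.filter_map]
    rfl
  have hCpred : (pvC2 (pvTagged groups)).filter
        (fun q => !decide ((q.1.1, q.2.1) = ((0 : Int), (1 : Int))) && decide (q.1.2 ≠ q.2.2))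
      = (pvC2 (pvTagged groups)).filter
        (fun q => !decide ((q.1.1, q.2.1) = ((0 : Int), (1 : Int))) &&
          decide (pvGroupIdx groups q.1.1 ≠ pvGroupIdx groups q.2.1)) := by
    apply List.filter_congr
    intro q hq
    rcases mem_pvC2 _ q hq with ⟨hq1, hq2⟩
    rw [hgidx q.1 hq1, hgidx q.2 hq2]
  have hSpred : (pvC2 (pvTagged groups)).filter
        (fun q => !decide ((q.1.1, q.2.1) = ((0 : Int), (1 : Int))) && !decide (q.1.2 ≠ q.2.2))
      = (pvC2 (pvTagged groups)).filter
        (fun q => !decide ((q.1.1, q.2.1) = ((0 : Int), (1 : Int))) &&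
          !decide (pvGroupIdx groups q.1.1 ≠ pvGroupIdx groups q.2.1)) := by
    apply List.filter_congr
    intro q hq
    rcases mem_pvC2 _ q hq with ⟨hq1, hq2⟩
    rw [hgidx q.1 hq1, hgidx q.2 hq2]
  have hC : ((pvC2 (pvTagged groups)).filter
        (fun q => !decide ((q.1.1, q.2.1) = ((0 : Int), (1 : Int))) && decide (q.1.2 ≠ q.2.2))).map
          (fun q => (q.1.1, q.2.1))
      = (pvC2 groups.flatten).filter
        (fun p => !decide (p = ((0 : Int), (1 : Int))) &&
          decide (pvGroupIdx groups p.1 ≠ pvGroupIdx groups p.2)) := by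
    rw [hCpred, hC2, List.filter_map]
    rfl
  have hS : ((pvC2 (pvTagged groups)).filter
        (fun q => !decide ((q.1.1, q.2.1) = ((0 : Int), (1 : Int))) && !decide (q.1.2 ≠ q.2.2))).map
          (fun q => (q.1.1, q.2.1))
      = (pvC2 groups.flatten).filter
        (fun p => !decide (p = ((0 : Int), (1 : Int))) &&
          !decide (pvGroupIdx groups p.1 ≠ pvGroupIdx groups p.2)) := by
    rw [hSpred, hC2, List.filter_map]
    rfl
  have hloop := pv_cov_loop (pvTagged groups) [] [] []
  have hB : pvGenCovB groups
      = (pvC2 groups.flatten).filter (fun p => p = ((0 : Int), (1 : Int)))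
        ++ (pvC2 groups.flatten).filter
            (fun p => !decide (p = ((0 : Int), (1 : Int))) &&
              decide (pvGroupIdx groups p.1 ≠ pvGroupIdx groups p.2))
        ++ (pvC2 groups.flatten).filter
            (fun p => !decide (p = ((0 : Int), (1 : Int))) &&
              !decide (pvGroupIdx groups p.1 ≠ pvGroupIdx groups p.2)) := by
    unfold pvGenCovB
    simp only [hloop, List.nil_append]
    rw [hH, hC, hS]
  -- pointwise predicate bridges for the A side
  have hp1 : ∀ p : Int × Int,
      ((pvCrossingCount groups p == 1) && decide (p ≠ ((0 : Int), (1 : Int))))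
      = (!decide (p = ((0 : Int), (1 : Int))) &&
         decide (pvGroupIdx groups p.1 ≠ pvGroupIdx groups p.2)) := by
    intro p
    unfold pvCrossingCount
    by_cases h : pvGroupIdx groups p.1 = pvGroupIdx groups p.2 <;>
      by_cases h2 : p = ((0 : Int), (1 : Int)) <;> simp [h, h2]
  have hp0 : ∀ p : Int × Int,
      ((pvCrossingCount groups p == 0) && decide (p ≠ ((0 : Int), (1 : Int))))
      = (!decide (p = ((0 : Int), (1 : Int))) &&
         !decide (pvGroupIdx groups p.1 ≠ pvGroupIdx groups p.2)) := by
    intro p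
    unfold pvCrossingCount
    by_cases h : pvGroupIdx groups p.1 = pvGroupIdx groups p.2 <;>
      by_cases h2 : p = ((0 : Int), (1 : Int)) <;> simp [h, h2]
  have hnd2 : (pvC2 groups.flatten).Nodup := pvC2_nodup _ hnd
  by_cases hmem : ((0 : Int), (1 : Int)) ∈ pvC2 groups.flatten
  · have hsingle := pv_filter_single (pvC2 groups.flatten) ((0 : Int), (1 : Int)) hnd2
    rw [if_pos hmem] at hsingle
    rw [hB]
    simp only [pvGenCovA, pvPairs_eq_pvC2, hmem, if_true]
    rw [pv_sorted_split _ _ (fun p _ => pv_key_vals groups p)]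
    rw [List.filter_filter, List.filter_filter]
    rw [List.filter_congr (fun p (_ : p ∈ pvC2 groups.flatten) => hp1 p)]
    rw [List.filter_congr (fun p (_ : p ∈ pvC2 groups.flatten) => hp0 p)]
    rw [hsingle]
    simp
  · have hsingle := pv_filter_single (pvC2 groups.flatten) ((0 : Int), (1 : Int)) hnd2
    rw [if_neg hmem] at hsingle
    rw [hB]
    simp only [pvGenCovA, pvPairs_eq_pvC2, hmem, if_false]
    rw [pv_sorted_split _ _ (fun p _ => pv_key_vals groups p)]
    rw [hsingle]
    have hne : ∀ p ∈ pvC2 groups.flatten, ¬(p = ((0 : Int), (1 : Int))) := by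
      intro p hp hpe
      exact hmem (hpe ▸ hp)
    have h1 : (pvC2 groups.flatten).filter (fun p => pvCrossingCount groups p == 1)
        = (pvC2 groups.flatten).filter
          (fun p => !decide (p = ((0 : Int), (1 : Int))) &&
            decide (pvGroupIdx groups p.1 ≠ pvGroupIdx groups p.2)) := by
      apply List.filter_congr
      intro p hp
      rw [← hp1 p]
      simp [hne p hp]

    have h0 : (pvC2 groups.flatten).filter (fun p => pvCrossingCount groups p == 0)
        = (pvC2 groups.flatten).filter
          (fun p => !decide (p = ((0 : Int), (1 : Int))) &&
            !decide (pvGroupIdx groups p.1 ≠ pvGroupIdx groups p.2)) := by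
      apply List.filter_congr
      intro p hp
      rw [← hp0 p]
      simp [hne p hp]
    rw [h1, h0]
    simp

-- the generator bodies agree on a nodup index list
theorem pv_gen_eq (indices : List Int) (hind : indices.Nodup) :
    pvGenA indices = pvGenB indices := by
  unfold pvGenA pvGenB
  congr 1
  funext partition
  rw [pv_partsB_eq]
  apply List.filterMap_congr
  intro groups hgs
  rw [pv_cov_eq groups (pv_parts_disj _ _ _ hgs) (pv_parts_nodup _ _ hind _ hgs)]

-- ===== VERDICT (by name: the statement is the Claim_ definition above) =====
theorem generate_partition_based_sequences_spec : Claim_equal_generate_partition_based_sequences := by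
  intro n _
  unfold Spec_generate_partition_based_sequences
  unfold generate_partition_based_sequences generate_partition_based_sequences_alt
  rw [pv_gen_eq _ (PySem.List.nodup_pyRange_one _ _)]
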